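-- pv_equiv track=rewrite | github.com/Lenglet-jeremy/ReperImmo | AnnoncesImmos/FusionFichiersJSON.py | reordonner_cles
-- ===== SOURCE A (Python) =====
-- def reordonner_cles(donnees):
--     if "Surface" in donnees and "NombreDePieces" in donnees:
--         donnees_ordonnes = {}
--
--         for cle, valeur in donnees.items():
--             if cle == "Surface":
--                 donnees_ordonnes[cle] = valeur
--                 donnees_ordonnes["NombreDePieces"] = donnees["NombreDePieces"]
--             elif cle != "NombreDePieces":
--                 donnees_ordonnes[cle] = valeur
--
--         return donnees_ordonnes
--     return donnees
-- ===== SOURCE B (Python) =====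
-- def reordonner_cles(donnees):
--     if "Surface" in donnees and "NombreDePieces" in donnees:
--         cles = [c for c in donnees if c != "NombreDePieces"]
--         cles.insert(cles.index("Surface") + 1, "NombreDePieces")
--         return {c: donnees[c] for c in cles}
--     return donnees
-- ===== Notes on version B (the rewrite author's own statement) =====
-- stated objective: simpler
-- what changed: B first computes the desired key order (drop NombreDePieces, insert it right after Surface in the key list) and then materializes the dict in one comprehension, instead of A's single interleaved loop with per-key special cases.
import Mathlib
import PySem

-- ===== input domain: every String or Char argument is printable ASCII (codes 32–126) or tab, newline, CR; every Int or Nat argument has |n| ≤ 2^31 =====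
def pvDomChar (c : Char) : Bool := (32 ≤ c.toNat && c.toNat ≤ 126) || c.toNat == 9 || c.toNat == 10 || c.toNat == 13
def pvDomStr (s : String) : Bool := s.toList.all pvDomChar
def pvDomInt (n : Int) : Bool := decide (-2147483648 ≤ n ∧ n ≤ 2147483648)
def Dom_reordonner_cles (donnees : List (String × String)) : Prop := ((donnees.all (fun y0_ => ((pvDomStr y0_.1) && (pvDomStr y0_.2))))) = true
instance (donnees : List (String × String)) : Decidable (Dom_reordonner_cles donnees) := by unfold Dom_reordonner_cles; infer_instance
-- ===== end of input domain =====

-- B reorders the keys first (drop "NombreDePieces", insert it after "Surface") and then emits the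
-- dict in one pass, instead of A's interleaved loop; return value only (neither mutates the input).

-- ===== PORT A =====
-- donnees["NombreDePieces"] is ported with getD ""; exact here because the guard ensures the key is present.
def reordonner_cles (donnees : List (String × String)) : List (String × String) :=
  let d := PySem.Dict.mk donnees
  if d.contains "Surface" && d.contains "NombreDePieces" then
    (donnees.foldl (fun acc p =>
        if p.1 = "Surface" then
          (acc.insert p.1 p.2).insert "NombreDePieces" (d.getD "NombreDePieces" "")
        else if p.1 ≠ "NombreDePieces" then acc.insert p.1 p.2
        else acc)
      PySem.Dict.empty).items
  else donnees

-- ===== PORT B =====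
-- cles.index("Surface") is ported with (index? …).getD 0; exact here because the guard ensures "Surface" ∈ cles,
-- and donnees[c] with getD "" because every c in cles is a key of donnees.
def reordonner_cles_alt (donnees : List (String × String)) : List (String × String) :=
  let d := PySem.Dict.mk donnees
  if d.contains "Surface" && d.contains "NombreDePieces" then
    let cles := (donnees.map Prod.fst).filter (fun c => c ≠ "NombreDePieces")
    let cles2 := PySem.List.insert cles (((PySem.List.index? cles "Surface").getD 0 + 1 : Nat) : Int) "NombreDePieces"
    cles2.map (fun c => (c, d.getD c ""))
  else donnees

-- ===== PRECONDITION & SPEC =====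
-- The Python argument is a dict, whose association-list image always has pairwise-distinct keys;
-- Pre_ only excludes lists that represent no Python dict (it excludes no input A accepts).
def Pre_reordonner_cles (donnees : List (String × String)) : Prop :=
  (donnees.map Prod.fst).Nodup
instance (donnees : List (String × String)) : Decidable (Pre_reordonner_cles donnees) := by
  unfold Pre_reordonner_cles; infer_instance

def pvWitness_reordonner_cles : (List (String × String)) :=
  [("Prix", "100"), ("Surface", "42"), ("Ville", "Lyon"), ("NombreDePieces", "3")]

def Spec_reordonner_cles (donnees : List (String × String)) (out : List (String × String)) : Prop := out = reordonner_cles_alt donnees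
instance (donnees : List (String × String)) (out : List (String × String)) : Decidable (Spec_reordonner_cles donnees out) := by unfold Spec_reordonner_cles; infer_instance

-- ===== CLAIM (what is proved, stated in full; the proofs are below) =====
def Claim_equal_reordonner_cles : Prop := ∀ (donnees : List (String × String)), Dom_reordonner_cles donnees → Pre_reordonner_cles donnees → Spec_reordonner_cles donnees (reordonner_cles donnees)

-- ===== LEMMAS AND PROOFS =====

-- the per-item contribution of A's loop, with ndp = donnees's value at "NombreDePieces"
def pvStep (ndp : String) (p : String × String) : List (String × String) :=
  if p.1 = "Surface" then [(p.1, p.2), ("NombreDePieces", ndp)]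
  else if p.1 = "NombreDePieces" then [] else [(p.1, p.2)]

-- the per-key contribution of B's reordered key list
def pvKeyStep (k : String) : List String :=
  if k = "Surface" then [k, "NombreDePieces"]
  else if k = "NombreDePieces" then [] else [k]

theorem pv_loopA (ndp : String) (xs : List (String × String)) (acc : PySem.Dict String String)
    (hA : ∀ k ∈ xs.map Prod.fst, k ≠ "NombreDePieces" → acc.contains k = false)
    (hB : "Surface" ∈ xs.map Prod.fst → acc.contains "NombreDePieces" = false)
    (hC : (xs.map Prod.fst).Nodup) :
    (xs.foldl (fun acc p =>
        if p.1 = "Surface" then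
          (acc.insert p.1 p.2).insert "NombreDePieces" ndp
        else if p.1 ≠ "NombreDePieces" then acc.insert p.1 p.2
        else acc) acc).items = acc.items ++ xs.flatMap (pvStep ndp) := by
  induction xs generalizing acc with
  | nil => simp
  | cons p rest ih =>
    obtain ⟨k, v⟩ := p
    simp only [List.map_cons, List.nodup_cons] at hC
    simp only [List.foldl_cons, List.flatMap_cons]
    by_cases hS : k = "Surface"
    · subst hS
      have hc1 : acc.contains "Surface" = false :=
        hA "Surface" (by simp) (by decide)
      have hc2 : (acc.insert "Surface" v).contains "NombreDePieces" = false := by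
        rw [PySem.Dict.contains_insert]
        simp [hB (by simp)]
      rw [if_pos rfl]
      rw [ih ((acc.insert "Surface" v).insert "NombreDePieces" ndp)
        (by
          intro x hx hxn
          rw [PySem.Dict.contains_insert, PySem.Dict.contains_insert]
          have hxs : x ≠ "Surface" := by
            intro e; subst e; exact hC.1 hx
          simp [hxn, hxs, hA x (by simp [hx]) hxn])
        (by intro hsm; exact absurd hsm hC.1)
        hC.2]
      rw [PySem.Dict.items_insert_of_not_contains _ _ hc2,
        PySem.Dict.items_insert_of_not_contains _ _ hc1]
      simp [pvStep]
    · by_cases hN : k = "NombreDePieces"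
      · subst hN
        rw [if_neg (by decide), if_neg (by simp)]
        rw [ih acc (fun x hx hxn => hA x (by simp [hx]) hxn)
          (fun hsm => hB (by simp [hsm])) hC.2]
        simp [pvStep]
      · rw [if_neg (by simpa using hS), if_pos (by simpa using hN)]
        have hc1 : acc.contains k = false := hA k (by simp) hN
        rw [ih (acc.insert k v)
          (by
            intro x hx hxn
            rw [PySem.Dict.contains_insert]
            have hxk : x ≠ k := by intro e; subst e; exact hC.1 hx
            simp [hxk, hA x (by simp [hx]) hxn])
          (by
            intro hsm
            rw [PySem.Dict.contains_insert]
            simp [Ne.symm hN, hB (by simp [hsm])])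
          hC.2]
        rw [PySem.Dict.items_insert_of_not_contains _ _ hc1]
        simp [pvStep, hS, hN]

theorem pv_flatMap_filter (ks : List String) (h : "Surface" ∉ ks) :
    ks.flatMap pvKeyStep = ks.filter (fun c => c ≠ "NombreDePieces") := by
  induction ks with
  | nil => rfl
  | cons x rest ih =>
    simp only [List.mem_cons, not_or] at h
    by_cases hx : x = "NombreDePieces" <;>
      simp [pvKeyStep, List.flatMap_cons, hx, Ne.symm h.1, ih h.2]

theorem pv_keyorder (ks : List String) (hmem : "Surface" ∈ ks) (hnd : ks.Nodup) :
    PySem.List.insert (ks.filter (fun c => c ≠ "NombreDePieces"))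
      (((PySem.List.index? (ks.filter (fun c => c ≠ "NombreDePieces")) "Surface").getD 0 + 1 : Nat) : Int)
      "NombreDePieces" = ks.flatMap pvKeyStep := by
  induction ks with
  | nil => cases hmem
  | cons x rest ih =>
    simp only [List.nodup_cons] at hnd
    by_cases hxs : x = "Surface"
    · subst hxs
      have hfil : ("Surface" :: rest).filter (fun c => c ≠ "NombreDePieces")
          = "Surface" :: rest.filter (fun c => c ≠ "NombreDePieces") := by
        simp
      rw [hfil, PySem.List.index?_cons_self]
      have h1 : (1 : Nat) ≤ ("Surface" :: rest.filter (fun c => c ≠ "NombreDePieces")).length := by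
        simp
      rw [show ((Option.getD (some 0) 0 + 1 : Nat) : Int) = ((1 : Nat) : Int) by norm_num,
        PySem.List.insert_natCast _ 1 _ h1]
      simp [pvKeyStep, List.flatMap_cons,
        pv_flatMap_filter rest (fun hc => hnd.1 hc)]
    · have hmem' : "Surface" ∈ rest := by
        rcases List.mem_cons.mp hmem with h | h
        · exact absurd h.symm hxs
        · exact h
      have ihr := ih hmem' hnd.2
      by_cases hxn : x = "NombreDePieces"
      · subst hxn
        rw [show ("NombreDePieces" :: rest).filter (fun c => c ≠ "NombreDePieces")
            = rest.filter (fun c => c ≠ "NombreDePieces") by simp]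
        simp only [List.flatMap_cons, show pvKeyStep "NombreDePieces" = [] from rfl,
          List.nil_append]
        exact ihr
      · rw [show (x :: rest).filter (fun c => c ≠ "NombreDePieces")
            = x :: rest.filter (fun c => c ≠ "NombreDePieces") by simp [hxn]]
        have hSf : "Surface" ∈ rest.filter (fun c => c ≠ "NombreDePieces") := by
          simp [List.mem_filter, hmem']
        obtain ⟨i, hi⟩ := Option.isSome_iff_exists.mp
          ((PySem.List.index?_isSome_iff _ _).mpr hSf)
        obtain ⟨hlt, -, -⟩ := PySem.List.getElem_of_index?_eq_some hi
        rw [PySem.List.index?_cons_of_ne _ (fun e => hxs e), hi]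
        have hb : i + 1 + 1 ≤ (x :: rest.filter (fun c => c ≠ "NombreDePieces")).length := by
          simp only [List.length_cons]; omega
        have hb2 : i + 1 ≤ (rest.filter (fun c => c ≠ "NombreDePieces")).length := by omega
        rw [show (Option.map (· + 1) (some i)).getD 0 = i + 1 from rfl]
        rw [PySem.List.insert_natCast _ (i + 1 + 1) _ hb]
        rw [hi] at ihr
        rw [show (Option.getD (some i) 0 + 1 : Nat) = i + 1 from rfl] at ihr
        rw [PySem.List.insert_natCast _ (i + 1) _ hb2] at ihr
        simp [pvKeyStep, List.flatMap_cons, hxs, hxn, List.take_succ_cons, ← ihr]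

theorem pv_lookup (donnees : List (String × String)) (k v : String)
    (hnd : (donnees.map Prod.fst).Nodup) (hmem : (k, v) ∈ donnees) :
    (PySem.Dict.mk donnees).getD k "" = v := by
  induction donnees with
  | nil => cases hmem
  | cons p rest ih =>
    obtain ⟨a, b⟩ := p
    simp only [List.map_cons, List.nodup_cons] at hnd
    rcases List.mem_cons.mp hmem with h | h
    · injection h with h1 h2; subst h1; subst h2
      simp [PySem.Dict.getD, PySem.Dict.get?_mk_cons]
    · have hk : a ≠ k := by
        intro e; subst e
        exact hnd.1 (List.mem_map.mpr ⟨(a, v), h, rfl⟩)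
      have := ih hnd.2 h
      simpa [PySem.Dict.getD, PySem.Dict.get?_mk_cons, hk] using this

theorem pv_flatMap_congr {α β : Type} (l : List α) (f g : α → List β)
    (h : ∀ x ∈ l, f x = g x) : l.flatMap f = l.flatMap g := by
  induction l with
  | nil => rfl
  | cons x rest ih =>
    simp only [List.flatMap_cons, h x (List.mem_cons_self), ih (fun y hy => h y (List.mem_cons_of_mem _ hy))]

-- ===== VERDICT (by name: the statement is the Claim_ definition above) =====
theorem reordonner_cles_spec : Claim_equal_reordonner_cles := by
  intro donnees _hdom hpre
  show reordonner_cles donnees = reordonner_cles_alt donnees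
  unfold reordonner_cles reordonner_cles_alt
  by_cases hg : ((PySem.Dict.mk donnees).contains "Surface"
      && (PySem.Dict.mk donnees).contains "NombreDePieces") = true
  · simp only [hg, if_true]
    have hSmem : "Surface" ∈ donnees.map Prod.fst := by
      have := (Bool.and_eq_true _ _).mp hg |>.1
      rw [PySem.Dict.contains_iff_mem_keys] at this
      simpa [PySem.Dict.keys] using this
    rw [pv_loopA ((PySem.Dict.mk donnees).getD "NombreDePieces" "") donnees PySem.Dict.empty
      (by intro x _ _; rfl) (by intro _; rfl) hpre]
    rw [pv_keyorder (donnees.map Prod.fst) hSmem hpre]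
    rw [show PySem.Dict.empty.items = ([] : List (String × String)) from rfl, List.nil_append]
    rw [List.flatMap_map, List.map_flatMap]
    refine pv_flatMap_congr _ _ _ ?_
    intro p hp
    obtain ⟨k, v⟩ := p
    by_cases hS : k = "Surface"
    · subst hS
      simp [pvStep, pvKeyStep, pv_lookup donnees "Surface" v hpre hp]
    · by_cases hN : k = "NombreDePieces"
      · subst hN
        simp [pvStep, pvKeyStep]
      · simp only [pvStep, pvKeyStep, if_neg hS, if_neg hN,
          List.map_cons, List.map_nil]
        rw [pv_lookup donnees k v hpre hp]
  · rw [if_neg hg, if_neg hg]
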